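-- pv_equiv track=rewrite | github.com/Applehii/AI_IELTS_scoring_model | app/pipeline/utils.py | _has_unclosed_string
-- ===== SOURCE A (Python) =====
-- def _has_unclosed_string(text: str) -> bool:
--     in_string = False
--     escaped = False
--
--     for ch in text:
--         if ch == '"' and not escaped:
--             in_string = not in_string
--         escaped = (ch == '\\') and not escaped
--
--     return in_string
-- ===== SOURCE B (Python) =====
-- def _has_unclosed_string(text: str) -> bool:
--     in_string = False
--     i = 0
--     n = len(text)
--     while i < n:
--         ch = text[i]
--         if ch == '\\':
--             i += 2  # skip the escaped character (whatever it is)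
--         elif ch == '"':
--             in_string = not in_string
--             i += 1
--         else:
--             i += 1
--     return in_string
-- ===== Notes on version B (the rewrite author's own statement) =====
-- stated objective: alternative
-- what changed: Replaces the escaped-boolean state machine over characters by an explicit index walk that consumes backslash-escape pairs with a skip-by-two, keeping only the in_string flag.
import Mathlib
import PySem

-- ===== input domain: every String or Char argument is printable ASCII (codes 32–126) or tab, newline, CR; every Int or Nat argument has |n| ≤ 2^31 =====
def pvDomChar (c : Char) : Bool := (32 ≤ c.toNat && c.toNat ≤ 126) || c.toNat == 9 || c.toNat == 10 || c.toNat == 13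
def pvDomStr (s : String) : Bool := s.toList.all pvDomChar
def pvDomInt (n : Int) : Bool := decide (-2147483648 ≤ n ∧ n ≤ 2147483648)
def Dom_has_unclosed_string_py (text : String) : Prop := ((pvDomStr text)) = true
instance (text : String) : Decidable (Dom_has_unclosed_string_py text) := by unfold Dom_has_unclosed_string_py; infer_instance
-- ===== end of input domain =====

-- B drops A's escaped-boolean state machine for an index walk that skips backslash-escape pairs; return value only, same complexity.

-- ===== PORT A =====
-- for ch in text: toggle in_string on an unescaped '"', track escaped = (ch == '\\') and not escaped
def has_unclosed_string_py (text : String) : Bool :=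
  (text.toList.foldl (fun (st : Bool × Bool) ch =>
      (if ch = '"' ∧ ¬ st.2 then !st.1 else st.1, decide (ch = '\\' ∧ ¬ st.2)))
    (false, false)).1

-- ===== PORT B =====
-- while i < n: on '\\' skip two characters, on '"' toggle, else advance; only in_string is kept
def altLoop : List Char → Bool → Bool
  | [], s => s
  | c :: rest, s =>
    if c = '\\' then
      match rest with
      | [] => s
      | _ :: rest' => altLoop rest' s
    else if c = '"' then altLoop rest (!s)
    else altLoop rest s

def has_unclosed_string_py_alt (text : String) : Bool :=
  altLoop text.toList false

-- ===== PRECONDITION & SPEC =====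
def Spec_has_unclosed_string_py (text : String) (out : Bool) : Prop := out = has_unclosed_string_py_alt text
instance (text : String) (out : Bool) : Decidable (Spec_has_unclosed_string_py text out) := by unfold Spec_has_unclosed_string_py; infer_instance

-- ===== CLAIM (what is proved, stated in full; the proofs are below) =====
def Claim_equal_has_unclosed_string_py : Prop := ∀ (text : String), Dom_has_unclosed_string_py text → Spec_has_unclosed_string_py text (has_unclosed_string_py text)

-- ===== LEMMAS AND PROOFS =====

-- A's fold from an unescaped state computes what B's skip-by-two walk computes.
theorem aFold_eq_altLoop (l : List Char) (s : Bool) :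
    (l.foldl (fun (st : Bool × Bool) ch =>
        (if ch = '"' ∧ ¬ st.2 then !st.1 else st.1, decide (ch = '\\' ∧ ¬ st.2)))
      (s, false)).1 = altLoop l s := by
  induction l, s using altLoop.induct with
  | case1 s => rfl
  | case2 s => rfl
  | case3 s head rest' ih =>
    rw [show altLoop ('\\' :: head :: rest') s = altLoop rest' s from rfl]
    simpa using ih
  | case4 rest s hq ih =>
    rw [altLoop.eq_def]
    simpa using ih
  | case5 c rest s hbs hq ih =>
    rw [altLoop.eq_def]
    simp only [hbs, hq, if_false, List.foldl_cons]
    simpa [hbs, hq] using ih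

-- ===== VERDICT (by name: the statement is the Claim_ definition above) =====
theorem has_unclosed_string_py_spec : Claim_equal_has_unclosed_string_py := by
  intro text _
  unfold Spec_has_unclosed_string_py has_unclosed_string_py has_unclosed_string_py_alt
  exact aFold_eq_altLoop text.toList false
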